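-- pv_equiv track=rewrite | github.com/MazinLab/MKIDReadout | DataReadout/Setup/Beammap/mapchecker.py | flag_counter
-- ===== SOURCE A (Python) =====
-- def flag_counter (beammap_array) :
--     flag_list=[0,0,0,0,0,0,0]
--     for  n in range(len(beammap_array)):
--         if int(beammap_array[n][1])==0:
--             flag_list[0]=flag_list[0]+1
--         elif int(beammap_array[n][1])==1:
--             flag_list[1]=flag_list[1]+1
--         elif int(beammap_array[n][1])==2:
--             flag_list[2]=flag_list[2]+1
--         elif int(beammap_array[n][1])==3:
--             flag_list[3]=flag_list[3]+1
--         elif int(beammap_array[n][1])==4: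
--             flag_list[4]=flag_list[4]+1
--         elif int(beammap_array[n][1])==5:
--             flag_list[5]=flag_list[5]+1
--         else:
--             flag_list[6]=flag_list[6]+1
--     return flag_list
-- ===== SOURCE B (Python) =====
-- def flag_counter(beammap_array):
--     # Pass 1: extract all flag values once.
--     flags = [int(row[1]) for row in beammap_array]
--     # Passes 2-7: one full .count scan per known bucket.
--     known = [flags.count(i) for i in range(6)]
--     # "other" is whatever the six scans did not account for.
--     return known + [len(flags) - sum(known)]
-- ===== Notes on version B (the rewrite author's own statement) =====
-- stated objective: idiomatic
-- what changed: Replaces A's single pass routing each element through an if-elif chain of indexed mutations by staged passes: extract the flag column once, then run one independent list.count scan per known bucket (six scans) and compute 'other' as the arithmetic remainder len minus the sum of the six counts.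
import Mathlib
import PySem

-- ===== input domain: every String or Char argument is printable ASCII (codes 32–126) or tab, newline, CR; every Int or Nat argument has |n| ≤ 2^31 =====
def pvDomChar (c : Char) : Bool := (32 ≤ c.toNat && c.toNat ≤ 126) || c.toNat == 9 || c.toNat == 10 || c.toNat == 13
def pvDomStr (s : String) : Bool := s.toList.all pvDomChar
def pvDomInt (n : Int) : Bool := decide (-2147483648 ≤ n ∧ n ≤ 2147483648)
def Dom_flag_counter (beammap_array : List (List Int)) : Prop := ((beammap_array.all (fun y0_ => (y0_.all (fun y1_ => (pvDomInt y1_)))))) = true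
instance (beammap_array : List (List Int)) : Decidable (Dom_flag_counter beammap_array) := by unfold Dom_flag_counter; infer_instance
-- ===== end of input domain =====

-- B replaces A's single pass (if-elif chain mutating a 7-slot list) by staged passes:
-- extract the flag column once, run one list.count scan per known bucket, and compute
-- "other" as the arithmetic remainder (same asymptotic cost, more idiomatic).

-- ===== PORT A =====
-- A's loop body: the if/elif chain updating one slot of the 7-element list.
def pvStepA (fl : List Int) (v : Int) : List Int :=
  if v == 0 then fl.set 0 (PySem.List.pyGetD fl 0 0 + 1)
  else if v == 1 then fl.set 1 (PySem.List.pyGetD fl 1 0 + 1)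
  else if v == 2 then fl.set 2 (PySem.List.pyGetD fl 2 0 + 1)
  else if v == 3 then fl.set 3 (PySem.List.pyGetD fl 3 0 + 1)
  else if v == 4 then fl.set 4 (PySem.List.pyGetD fl 4 0 + 1)
  else if v == 5 then fl.set 5 (PySem.List.pyGetD fl 5 0 + 1)
  else fl.set 6 (PySem.List.pyGetD fl 6 0 + 1)

def flag_counter (beammap_array : List (List Int)) : List Int :=
  (PySem.List.pyRange 0 (PySem.List.len beammap_array) 1).foldl
    (fun fl n => pvStepA fl (PySem.List.pyGetD (PySem.List.pyGetD beammap_array n []) 1 0))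
    [0, 0, 0, 0, 0, 0, 0]

-- ===== PORT B =====
def flag_counter_alt (beammap_array : List (List Int)) : List Int :=
  -- Pass 1: extract all flag values once.
  let flags := beammap_array.map (fun row => PySem.List.pyGetD row 1 0)
  -- Passes 2-7: one full .count scan per known bucket.
  let known := (PySem.List.pyRange 0 6 1).map (fun i => (PySem.List.count flags i : Int))
  -- "other" is whatever the six scans did not account for.
  known ++ [PySem.List.len flags - known.sum]

-- ===== PRECONDITION & SPEC =====
-- Pre_ excludes inputs containing a row of fewer than 2 elements, on which the
-- Python A (and B alike) raises IndexError at row[1].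
def Pre_flag_counter (beammap_array : List (List Int)) : Prop :=
  ∀ row ∈ beammap_array, 2 ≤ row.length
instance (beammap_array : List (List Int)) : Decidable (Pre_flag_counter beammap_array) := by
  unfold Pre_flag_counter; infer_instance

def pvWitness_flag_counter : List (List Int) := [[10, 0], [11, 5], [12, 9], [13, 5]]

def Spec_flag_counter (beammap_array : List (List Int)) (out : List Int) : Prop := out = flag_counter_alt beammap_array
instance (beammap_array : List (List Int)) (out : List Int) : Decidable (Spec_flag_counter beammap_array out) := by unfold Spec_flag_counter; infer_instance

-- ===== CLAIM (what is proved, stated in full; the proofs are below) =====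
def Claim_equal_flag_counter : Prop := ∀ (beammap_array : List (List Int)), Dom_flag_counter beammap_array → Pre_flag_counter beammap_array → Spec_flag_counter beammap_array (flag_counter beammap_array)

-- ===== LEMMAS AND PROOFS =====

-- Invariant of A's fold: each of the six buckets accumulates the count of its value,
-- the last bucket the remainder.
lemma pvFold_stepA (vs : List Int) (a0 a1 a2 a3 a4 a5 a6 : Int) :
    vs.foldl pvStepA [a0, a1, a2, a3, a4, a5, a6] =
      [a0 + vs.count 0, a1 + vs.count 1, a2 + vs.count 2, a3 + vs.count 3,
       a4 + vs.count 4, a5 + vs.count 5,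
       a6 + ((vs.length : Int) -
         (vs.count 0 + vs.count 1 + vs.count 2 + vs.count 3 + vs.count 4 + vs.count 5))] := by
  induction vs generalizing a0 a1 a2 a3 a4 a5 a6 with
  | nil => simp
  | cons v vs ih =>
    by_cases h0 : v = 0 <;> by_cases h1 : v = 1 <;> by_cases h2 : v = 2 <;>
      by_cases h3 : v = 3 <;> by_cases h4 : v = 4 <;> by_cases h5 : v = 5 <;>
      simp_all [pvStepA, PySem.List.pyGetD, List.count_cons, ih] <;> omega

-- ===== VERDICT (by name: the statement is the Claim_ definition above) =====
theorem flag_counter_spec : Claim_equal_flag_counter := by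
  intro b _ _
  unfold Spec_flag_counter flag_counter flag_counter_alt
  simp only [PySem.List.len_eq]
  rw [PySem.List.foldl_pyRange_zero_pyGetD' b ([] : List Int)
        (fun fl row => pvStepA fl (PySem.List.pyGetD row 1 0)) [0,0,0,0,0,0,0]]
  rw [show (List.foldl (fun (fl : List Int) (row : List Int) => pvStepA fl (PySem.List.pyGetD row 1 0)) [0,0,0,0,0,0,0] b)
        = List.foldl pvStepA [0,0,0,0,0,0,0] (b.map (fun r => PySem.List.pyGetD r 1 0)) from (List.foldl_map).symm,
      pvFold_stepA]
  have hr : PySem.List.pyRange 0 6 1 = [0, 1, 2, 3, 4, 5] := by decide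
  simp only [hr, List.map_cons, List.map_nil, PySem.List.count_eq]
  simp
  omega
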